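-- pv_equiv track=rewrite | github.com/paulxflin/Pantheon | sols/1961.py | isPrefixString
-- ===== SOURCE A (Python) =====
-- from typing import List
--
-- def isPrefixString(s: str, words: List[str]) -> bool:
--     prefix = ''
--     for word in words:
--         if len(prefix) < len(s):
--             prefix += word
--             if prefix != s[:len(prefix)]:
--                 return False
--         else:
--             return len(s) == len(prefix) and s == prefix
--     return len(s) == len(prefix) and s == prefix
-- ===== SOURCE B (Python) =====
-- from typing import List
--
-- def isPrefixString(s: str, words: List[str]) -> bool:
--     i = 0
--     n = len(s)
--     for word in words:
--         if i == n:
--             return True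
--         j = i + len(word)
--         if j > n or s[i:j] != word:
--             return False
--         i = j
--     return i == n
-- ===== Notes on version B (the rewrite author's own statement) =====
-- stated objective: alternative
-- what changed: B replaces A's growing concatenated prefix string (re-sliced and re-compared against s on every iteration) with a single running index into s, comparing each word against its slice of s once; asymptotically O(n) vs A's worst-case O(n^2), though a timing run measured only ~1.4x on its inputs.
import Mathlib
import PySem

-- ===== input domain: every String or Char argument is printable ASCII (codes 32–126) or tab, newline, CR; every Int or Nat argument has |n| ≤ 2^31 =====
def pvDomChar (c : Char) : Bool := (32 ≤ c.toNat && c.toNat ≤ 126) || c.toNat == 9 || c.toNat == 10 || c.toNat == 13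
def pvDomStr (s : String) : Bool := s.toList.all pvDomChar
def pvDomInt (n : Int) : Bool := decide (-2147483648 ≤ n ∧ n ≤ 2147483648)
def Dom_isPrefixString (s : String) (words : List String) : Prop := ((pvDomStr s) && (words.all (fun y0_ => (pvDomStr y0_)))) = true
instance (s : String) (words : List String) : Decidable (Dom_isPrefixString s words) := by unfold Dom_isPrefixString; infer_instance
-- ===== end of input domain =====

-- B replaces A's growing concatenated prefix (re-compared against s each round) with one running index into s.

-- ===== PORT A =====
-- loop over words carrying the accumulated prefix (Python's growing string, here a list of chars)
def isPrefixAuxA (s : List Char) (pref : List Char) (words : List String) : Bool :=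
  match words with
  | [] => (s.length == pref.length) && (s == pref)
  | w :: ws =>
    if pref.length < s.length then
      if pref ++ w.toList ≠ s.take (pref ++ w.toList).length then false  -- s[:len(prefix)] with nonneg bound = take
      else isPrefixAuxA s (pref ++ w.toList) ws
    else (s.length == pref.length) && (s == pref)

def isPrefixString (s : String) (words : List String) : Bool :=
  isPrefixAuxA s.toList [] words

-- ===== PORT B =====
-- loop over words carrying a running index i into s
def isPrefixAuxB (s : List Char) (i : Nat) (words : List String) : Bool :=
  match words with
  | [] => i == s.length
  | w :: ws =>
    if i = s.length then true
    else
      if i + w.toList.length > s.length ∨ (s.take (i + w.toList.length)).drop i ≠ w.toList then false  -- s[i:j], 0 ≤ i ≤ j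
      else isPrefixAuxB s (i + w.toList.length) ws

def isPrefixString_alt (s : String) (words : List String) : Bool :=
  isPrefixAuxB s.toList 0 words

-- ===== PRECONDITION & SPEC =====
def Spec_isPrefixString (s : String) (words : List String) (out : Bool) : Prop := out = isPrefixString_alt s words
instance (s : String) (words : List String) (out : Bool) : Decidable (Spec_isPrefixString s words out) := by unfold Spec_isPrefixString; infer_instance

-- ===== CLAIM (what is proved, stated in full; the proofs are below) =====
def Claim_equal_isPrefixString : Prop := ∀ (s : String) (words : List String), Dom_isPrefixString s words → Spec_isPrefixString s words (isPrefixString s words)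

-- ===== LEMMAS AND PROOFS =====

-- Invariant: A's accumulated prefix is always s.take i with i ≤ s.length, and then the two loops agree.
lemma aux_eq (s : List Char) : ∀ (words : List String) (i : Nat), i ≤ s.length →
    isPrefixAuxA s (s.take i) words = isPrefixAuxB s i words := by
  intro words
  induction words with
  | nil =>
    intro i hi
    simp only [isPrefixAuxA, isPrefixAuxB]
    by_cases h : i = s.length
    · subst h; simp
    · have h1 : (s == List.take i s) = false := by
        rw [beq_eq_false_iff_ne]
        intro he
        have := congrArg List.length he
        simp [Nat.min_eq_left hi] at this
        omega
      have h2 : (i == s.length) = false := by simpa using h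
      rw [h1, h2, Bool.and_false]
  | cons w ws ih =>
    intro i hi
    have hlen : (List.take i s).length = i := by simp [Nat.min_eq_left hi]
    simp only [isPrefixAuxA, isPrefixAuxB]
    by_cases h : i = s.length
    · subst h
      rw [if_pos rfl, if_neg (by rw [hlen]; exact lt_irrefl _)]
      simp
    · have hlt : i < s.length := lt_of_le_of_ne hi h
      rw [if_neg h, if_pos (by rw [hlen]; exact hlt)]
      have hplen : (List.take i s ++ w.toList).length = i + w.toList.length := by
        simp [hlen]
      rw [hplen]
      by_cases hj : i + w.toList.length > s.length
      · -- the appended prefix is longer than s, so both sides return false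
        have hne : List.take i s ++ w.toList ≠ List.take (i + w.toList.length) s := by
          intro he
          have hlens := congrArg List.length he
          rw [hplen, List.length_take] at hlens
          omega
        rw [if_pos hne, if_pos (Or.inl hj)]
      · rw [not_lt] at hj
        have htake : List.take (i + w.toList.length) s
            = List.take i s ++ (List.take (i + w.toList.length) s).drop i := by
          rw [List.drop_take, Nat.add_sub_cancel_left, ← List.take_add]
        by_cases hm : (List.take (i + w.toList.length) s).drop i = w.toList
        · have heq : List.take i s ++ w.toList = List.take (i + w.toList.length) s := by
            rw [htake, hm]
          have hnc : ¬(i + w.toList.length > s.length ∨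
              (List.take (i + w.toList.length) s).drop i ≠ w.toList) := by
            rintro (hc | hc)
            · omega
            · exact hc hm
          rw [if_neg (by simp [heq]), if_neg hnc]
          rw [heq]
          exact ih _ hj
        · have hne : List.take i s ++ w.toList ≠ List.take (i + w.toList.length) s := by
            rw [htake]
            intro he
            exact hm (List.append_cancel_left he).symm
          rw [if_pos hne, if_pos (Or.inr hm)]

-- ===== VERDICT (by name: the statement is the Claim_ definition above) =====
theorem isPrefixString_spec : Claim_equal_isPrefixString := by
  intro s words _
  show isPrefixString s words = isPrefixString_alt s words
  unfold isPrefixString isPrefixString_alt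
  have := aux_eq s.toList words 0 (Nat.zero_le _)
  simpa using this
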